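-- pv_equiv track=rewrite | github.com/kaseyzapatka/nepa | code/extract/extract_gencap.py | is_invalid_match
-- ===== SOURCE A (Python) =====
-- def is_invalid_match(match_text):
--     """Filter out non-capacity usages like MW-year or $/MW."""
--     if not match_text:
--         return False
--     lower = match_text.lower()
--     invalid_tokens = [
--         'mw-year', 'mw yr', 'mw/yr', 'mwy',
--         '$/mw', '$ /mw', 'per mw', 'mw per',
--     ]
--     return any(tok in lower for tok in invalid_tokens)
-- ===== SOURCE B (Python) =====
-- def is_invalid_match(match_text):
--     """Filter out non-capacity usages like MW-year or $/MW."""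
--     if not match_text:
--         return False
--     lower = match_text.lower()
--     tokens = ('mw-year', 'mw yr', 'mw/yr', 'mwy',
--               '$/mw', '$ /mw', 'per mw', 'mw per')
--     for i in range(len(lower)):
--         if any(lower.startswith(tok, i) for tok in tokens):
--             return True
--     return False
-- ===== Notes on version B (the rewrite author's own statement) =====
-- stated objective: alternative
-- what changed: B scans the lowered text position by position, testing at each offset whether any invalid token starts there via startswith, instead of A's per-token whole-text substring membership searches.
import Mathlib
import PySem

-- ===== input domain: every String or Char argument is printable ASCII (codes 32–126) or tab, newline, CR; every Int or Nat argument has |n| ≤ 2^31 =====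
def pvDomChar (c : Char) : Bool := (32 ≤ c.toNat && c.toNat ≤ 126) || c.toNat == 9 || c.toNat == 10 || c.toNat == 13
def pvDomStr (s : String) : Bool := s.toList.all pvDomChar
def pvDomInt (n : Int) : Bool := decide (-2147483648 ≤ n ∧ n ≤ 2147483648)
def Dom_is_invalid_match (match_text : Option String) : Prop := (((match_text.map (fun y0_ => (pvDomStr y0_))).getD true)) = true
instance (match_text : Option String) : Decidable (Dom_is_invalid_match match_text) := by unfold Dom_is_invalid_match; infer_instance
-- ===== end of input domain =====

-- ===== PORT A =====
-- B scans the lowered text position by position instead of A's per-token substring tests. Objective: alternative.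
-- A-side: the invalid-token list, in A's order.
def pvTokensA : List String :=
  ["mw-year", "mw yr", "mw/yr", "mwy", "$/mw", "$ /mw", "per mw", "mw per"]

def is_invalid_match (match_text : Option String) : Bool :=
  match match_text with
  | none => false
  | some s =>
    if s.toList.isEmpty then false   -- `if not match_text` (empty string is falsy)
    else
      let lower := PySem.Str.lower s
      pvTokensA.any (fun tok => PySem.Str.isIn tok lower)   -- any(tok in lower for tok in invalid_tokens)

-- ===== PORT B =====
-- B-side: the same tokens as character lists; pvScan walks the text one position at a time,
-- testing whether any token starts at the current position (lower.startswith(tok, i)).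
def pvTokensB : List (List Char) :=
  ["mw-year".toList, "mw yr".toList, "mw/yr".toList, "mwy".toList,
   "$/mw".toList, "$ /mw".toList, "per mw".toList, "mw per".toList]

def pvScan : List Char → Bool
  | [] => false
  | c :: rest =>
    if pvTokensB.any (fun t => t.isPrefixOf (c :: rest)) then true
    else pvScan rest

def is_invalid_match_alt (match_text : Option String) : Bool :=
  match match_text with
  | none => false
  | some s =>
    if s.toList.isEmpty then false
    else pvScan (PySem.Str.lower s).toList

-- ===== PRECONDITION & SPEC =====
def Spec_is_invalid_match (match_text : Option String) (out : Bool) : Prop := out = is_invalid_match_alt match_text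
instance (match_text : Option String) (out : Bool) : Decidable (Spec_is_invalid_match match_text out) := by unfold Spec_is_invalid_match; infer_instance

-- ===== CLAIM (what is proved, stated in full; the proofs are below) =====
def Claim_equal_is_invalid_match : Prop := ∀ (match_text : Option String), Dom_is_invalid_match match_text → Spec_is_invalid_match match_text (is_invalid_match match_text)

-- ===== LEMMAS AND PROOFS =====

-- The positional scan finds exactly the infix occurrences of some token.
theorem pvScan_iff (l : List Char) : pvScan l = true ↔ ∃ t ∈ pvTokensB, t <:+: l := by
  induction l with
  | nil =>
    simp only [pvScan, List.infix_nil]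
    constructor
    · intro h; exact absurd h (by decide)
    · rintro ⟨t, ht, rfl⟩; exact absurd ht (by decide)
  | cons c rest ih =>
    simp only [pvScan]
    split
    · rename_i h
      simp only [List.any_eq_true, List.isPrefixOf_iff_prefix] at h
      obtain ⟨t, ht, hp⟩ := h
      simp only [true_iff]
      exact ⟨t, ht, hp.isInfix⟩
    · rename_i h
      simp only [List.any_eq_true, List.isPrefixOf_iff_prefix] at h
      push_neg at h
      rw [ih]
      constructor
      · rintro ⟨t, ht, hi⟩; exact ⟨t, ht, hi.trans (List.suffix_cons c rest).isInfix⟩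
      · rintro ⟨t, ht, hi⟩
        rcases List.infix_cons_iff.mp hi with hp | hi'
        · exact absurd hp (h t ht)
        · exact ⟨t, ht, hi'⟩

theorem any_isIn_eq_pvScan (l : List Char) :
    pvTokensA.any (fun tok => PySem.Chars.isIn tok.toList l) = pvScan l := by
  have hiff : pvTokensA.any (fun tok => PySem.Chars.isIn tok.toList l) = true ↔ pvScan l = true := by
    rw [pvScan_iff]
    simp only [List.any_eq_true, PySem.Chars.isIn_iff_infix]
    have hBT : pvTokensB = pvTokensA.map String.toList := rfl
    rw [hBT]
    simp [List.mem_map]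
  exact Bool.eq_iff_iff.mpr hiff

-- ===== VERDICT (by name: the statement is the Claim_ definition above) =====
theorem is_invalid_match_spec : Claim_equal_is_invalid_match := by
  intro match_text _
  unfold Spec_is_invalid_match is_invalid_match is_invalid_match_alt
  cases match_text with
  | none => rfl
  | some s =>
    by_cases h : s.toList.isEmpty <;> simp [h, any_isIn_eq_pvScan]
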